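-- pv_equiv track=rewrite | github.com/rondorkerin/Genetic-Algorithm-PID-Controller-Tuner | genetic-tuner/lib/listtools.py | get_list_startswith
-- ===== SOURCE A (Python) =====
-- def get_list_startswith(a_list, starts_with, is_strip=1):
--     tmp = a_list[:]
--     if is_strip:
--         tmp = [x.strip() for x in tmp]
--
--     start_line_index = 0
--     for i in range(len(tmp)):
--         if tmp[i].startswith(starts_with):
--             start_line_index = i
--
--     return a_list[start_line_index:]
-- ===== SOURCE B (Python) =====
-- def get_list_startswith(a_list, starts_with, is_strip=1):
--     idx = 0
--     for i in range(len(a_list) - 1, -1, -1):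
--         v = a_list[i].strip() if is_strip else a_list[i]
--         if v.startswith(starts_with):
--             idx = i
--             break
--     return a_list[idx:]
-- ===== Notes on version B (the rewrite author's own statement) =====
-- stated objective: idiomatic
-- what changed: Replaces the full forward last-wins scan over a pre-built (optionally stripped) copy of the list with a reverse early-exit search that strips lazily and stops at the first match from the end.
import Mathlib
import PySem

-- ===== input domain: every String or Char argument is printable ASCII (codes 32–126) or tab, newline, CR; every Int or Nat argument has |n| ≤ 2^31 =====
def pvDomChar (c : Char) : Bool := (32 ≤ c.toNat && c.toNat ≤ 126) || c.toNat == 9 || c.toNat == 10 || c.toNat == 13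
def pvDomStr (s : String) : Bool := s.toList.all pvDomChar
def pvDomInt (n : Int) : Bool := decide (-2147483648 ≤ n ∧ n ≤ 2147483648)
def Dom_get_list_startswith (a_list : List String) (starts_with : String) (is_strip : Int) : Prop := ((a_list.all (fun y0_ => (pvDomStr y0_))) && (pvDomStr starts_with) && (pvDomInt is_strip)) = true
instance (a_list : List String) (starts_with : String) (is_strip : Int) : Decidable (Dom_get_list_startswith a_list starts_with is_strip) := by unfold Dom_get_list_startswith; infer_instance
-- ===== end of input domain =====

-- B replaces A's forward last-wins scan over a pre-stripped copy by a reverse early-exit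
-- search that strips lazily; equivalence of the RETURN value is proved on all of Dom.

-- ===== PORT A =====
def get_list_startswith (a_list : List String) (starts_with : String) (is_strip : Int) : List String :=
  let tmp := a_list
  let tmp := if is_strip ≠ 0 then tmp.map PySem.Str.strip else tmp
  let start_line_index :=
    (List.range tmp.length).foldl
      (fun acc i => if PySem.Str.startswith (tmp.getD i "") starts_with then i else acc) 0
  a_list.drop start_line_index

-- ===== PORT B =====
-- reverse search: argument n counts down; checks index n-1 first, returns on first match, 0 if none
def pvAltSearch (a_list : List String) (starts_with : String) (strip : Bool) : Nat → Nat
  | 0 => 0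
  | (i+1) =>
    let v := a_list.getD i ""
    let v := if strip then PySem.Str.strip v else v
    if PySem.Str.startswith v starts_with then i else pvAltSearch a_list starts_with strip i

def get_list_startswith_alt (a_list : List String) (starts_with : String) (is_strip : Int) : List String :=
  a_list.drop (pvAltSearch a_list starts_with (is_strip ≠ 0) a_list.length)

-- ===== PRECONDITION & SPEC =====
def Spec_get_list_startswith (a_list : List String) (starts_with : String) (is_strip : Int) (out : List String) : Prop := out = get_list_startswith_alt a_list starts_with is_strip
instance (a_list : List String) (starts_with : String) (is_strip : Int) (out : List String) : Decidable (Spec_get_list_startswith a_list starts_with is_strip out) := by unfold Spec_get_list_startswith; infer_instance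

-- ===== CLAIM (what is proved, stated in full; the proofs are below) =====
def Claim_equal_get_list_startswith : Prop := ∀ (a_list : List String) (starts_with : String) (is_strip : Int), Dom_get_list_startswith a_list starts_with is_strip → Spec_get_list_startswith a_list starts_with is_strip (get_list_startswith a_list starts_with is_strip)

-- ===== LEMMAS AND PROOFS =====

-- last-wins forward fold over range n = a primitive recursion checking index n-1 first
theorem pv_fold_eq_rec (p : Nat → Bool) (n : Nat) :
    (List.range n).foldl (fun acc i => if p i then i else acc) 0 =
      Nat.rec (motive := fun _ => Nat) 0 (fun i ih => if p i then i else ih) n := by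
  induction n with
  | zero => simp
  | succ n ih =>
    rw [List.range_succ, List.foldl_append]
    simp only [List.foldl_cons, List.foldl_nil]
    by_cases h : p n <;> simp [h, ih]

theorem pvAltSearch_eq_rec (a_list : List String) (sw : String) (st : Bool) (n : Nat) :
    pvAltSearch a_list sw st n =
      Nat.rec (motive := fun _ => Nat) 0
        (fun i ih => if PySem.Str.startswith
            (if st then PySem.Str.strip (a_list.getD i "") else a_list.getD i "") sw
            then i else ih) n := by
  induction n with
  | zero => rfl
  | succ n ih => simp only [pvAltSearch, ih]

theorem pv_getD_map_strip (l : List String) (i : Nat) :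
    (l.map PySem.Str.strip).getD i "" = PySem.Str.strip (l.getD i "") := by
  induction l generalizing i with
  | nil => simp [List.getD]; decide
  | cons a l ih => cases i with
    | zero => simp [List.getD]
    | succ j => simpa [List.getD] using ih j

-- ===== VERDICT (by name: the statement is the Claim_ definition above) =====
theorem get_list_startswith_spec : Claim_equal_get_list_startswith := by
  intro a_list sw is_strip _
  unfold Spec_get_list_startswith get_list_startswith get_list_startswith_alt
  simp only []
  rw [pvAltSearch_eq_rec]
  by_cases hs : is_strip ≠ 0
  · rw [if_pos hs, List.length_map,
      pv_fold_eq_rec (fun i => PySem.Str.startswith ((a_list.map PySem.Str.strip).getD i "") sw)]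
    simp only [pv_getD_map_strip]
    simp [hs]
  · rw [not_not] at hs
    rw [if_neg (by simp [hs]),
      pv_fold_eq_rec (fun i => PySem.Str.startswith (a_list.getD i "") sw)]
    simp [hs]
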